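-- pv_equiv track=rewrite | github.com/arnav-ag17/autochat | arvo/envman/collect.py | classify_values
-- ===== SOURCE A (Python) =====
-- from typing import Dict, List, Tuple
--
-- NON_SENSITIVE = {"PORT", "ENV", "DEBUG", "NODE_ENV", "PYTHONUNBUFFERED"}
--
-- def classify_values(required_keys: List[str], overrides_env: Dict[str, str] | None, parsed_env: Dict[str, str] | None, noninteractive: bool) -> Tuple[Dict[str, str], Dict[str, str], List[str], List[str]]:
--     values_plain: Dict[str, str] = {}
--     values_secret: Dict[str, str] = {}
--     missing: List[str] = []
--     provided: List[str] = []
--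
--     merged: Dict[str, str] = {}
--     for source in (parsed_env or {}, overrides_env or {}):
--         for k, v in source.items():
--             merged[k] = v
--
--     for k in required_keys:
--         if k in merged and merged[k] is not None:
--             provided.append(k)
--             if k in NON_SENSITIVE:
--                 values_plain[k] = merged[k]
--             else:
--                 values_secret[k] = merged[k]
--         else:
--             missing.append(k)
--
--     # Non-interactive: keep missing as warnings; no prompt in v1
--     return values_plain, values_secret, missing, provided
-- ===== SOURCE B (Python) =====
-- from typing import Dict, List, Tuple
--
-- NON_SENSITIVE = {"PORT", "ENV", "DEBUG", "NODE_ENV", "PYTHONUNBUFFERED"}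
--
-- def classify_values(required_keys: List[str], overrides_env: Dict[str, str] | None, parsed_env: Dict[str, str] | None, noninteractive: bool) -> Tuple[Dict[str, str], Dict[str, str], List[str], List[str]]:
--     # Staged decomposition: resolve every key once into a (key, value-or-None) list,
--     # then derive each of the four outputs by its own comprehension over that list.
--     def resolve(k):
--         for src in (overrides_env, parsed_env):
--             if src is not None and k in src:
--                 return src[k]  # may be None; treated as missing below, like A
--         return None
--
--     resolved = [(k, resolve(k)) for k in required_keys]
--     missing = [k for k, v in resolved if v is None]
--     provided = [k for k, v in resolved if v is not None]
--     values_plain = {k: v for k, v in resolved if v is not None and k in NON_SENSITIVE}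
--     values_secret = {k: v for k, v in resolved if v is not None and k not in NON_SENSITIVE}
--     return values_plain, values_secret, missing, provided
-- ===== Notes on version B (the rewrite author's own statement) =====
-- stated objective: alternative
-- what changed: Replaces A's build-merged-dict-then-single-classification-loop-with-four-accumulators by a staged decomposition: resolve every required key once into a (key, value) list (overrides first, then parsed), then derive missing/provided/plain/secret each by its own comprehension over that list; no merged dict and no accumulator loop.
import Mathlib
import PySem

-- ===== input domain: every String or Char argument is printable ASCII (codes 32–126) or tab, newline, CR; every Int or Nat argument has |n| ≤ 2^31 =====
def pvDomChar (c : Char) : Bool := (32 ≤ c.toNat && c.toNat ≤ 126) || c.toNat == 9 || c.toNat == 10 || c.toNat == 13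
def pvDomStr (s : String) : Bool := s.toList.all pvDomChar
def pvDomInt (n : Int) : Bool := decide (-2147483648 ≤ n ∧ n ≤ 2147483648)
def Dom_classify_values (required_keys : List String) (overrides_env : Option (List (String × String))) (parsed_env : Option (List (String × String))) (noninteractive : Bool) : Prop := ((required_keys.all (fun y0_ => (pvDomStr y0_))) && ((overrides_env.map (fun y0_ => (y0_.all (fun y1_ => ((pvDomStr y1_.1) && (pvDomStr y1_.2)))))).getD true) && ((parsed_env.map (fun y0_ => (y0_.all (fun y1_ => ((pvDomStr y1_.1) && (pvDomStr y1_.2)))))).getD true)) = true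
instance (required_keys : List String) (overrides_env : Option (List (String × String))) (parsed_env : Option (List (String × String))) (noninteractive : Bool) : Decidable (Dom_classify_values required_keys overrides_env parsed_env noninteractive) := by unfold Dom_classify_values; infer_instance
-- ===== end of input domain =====

-- B replaces A's merged-dict + single four-accumulator loop by a staged decomposition:
-- resolve each required key once into a (key, value) list, then derive each of the four
-- outputs by its own pass over that list; objective: alternative.

-- NON_SENSITIVE, a module constant used by both A and B
def NON_SENSITIVE : List String := ["PORT", "ENV", "DEBUG", "NODE_ENV", "PYTHONUNBUFFERED"]

-- ===== PORT A =====
def classify_values (required_keys : List String) (overrides_env : Option (List (String × String))) (parsed_env : Option (List (String × String))) (noninteractive : Bool) : (List (String × String)) × (List (String × String)) × List String × List String :=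
  -- merged: for source in (parsed_env or {}, overrides_env or {}): merged[k] = v
  let merged : PySem.Dict String String :=
    [parsed_env.getD [], overrides_env.getD []].foldl
      (fun m source => source.foldl (fun m kv => m.insert kv.1 kv.2) m) PySem.Dict.empty
  let st := required_keys.foldl
    (fun (st : PySem.Dict String String × PySem.Dict String String × List String × List String) k =>
      -- 'k in merged and merged[k] is not None': values are str here, never None
      match merged.get? k with
      | some v =>
        if k ∈ NON_SENSITIVE then (st.1.insert k v, st.2.1, st.2.2.1, st.2.2.2 ++ [k])
        else (st.1, st.2.1.insert k v, st.2.2.1, st.2.2.2 ++ [k])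
      | none => (st.1, st.2.1, st.2.2.1 ++ [k], st.2.2.2))
    (PySem.Dict.empty, PySem.Dict.empty, [], [])
  (st.1.items, st.2.1.items, st.2.2.1, st.2.2.2)

-- ===== PORT B =====
-- resolve(k): first source that is not None and contains k yields its value
def cvb_resolve (sources : List (Option (List (String × String)))) (k : String) : Option String :=
  match sources with
  | [] => none
  | src :: rest =>
    match src with
    | some d =>
      match (PySem.Dict.mk d).get? k with
      | some v => some v
      | none => cvb_resolve rest k
    | none => cvb_resolve rest k

def classify_values_alt (required_keys : List String) (overrides_env : Option (List (String × String))) (parsed_env : Option (List (String × String))) (noninteractive : Bool) : (List (String × String)) × (List (String × String)) × List String × List String :=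
  let resolved := required_keys.map (fun k => (k, cvb_resolve [overrides_env, parsed_env] k))
  let missing := (resolved.filter (fun kv => kv.2.isNone)).map Prod.fst
  let provided := (resolved.filter (fun kv => kv.2.isSome)).map Prod.fst
  -- dict comprehensions over resolved
  let values_plain := resolved.foldl (fun d kv =>
      match kv.2 with
      | some v => if kv.1 ∈ NON_SENSITIVE then d.insert kv.1 v else d
      | none => d) (PySem.Dict.empty : PySem.Dict String String)
  let values_secret := resolved.foldl (fun d kv =>
      match kv.2 with
      | some v => if kv.1 ∉ NON_SENSITIVE then d.insert kv.1 v else d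
      | none => d) (PySem.Dict.empty : PySem.Dict String String)
  (values_plain.items, values_secret.items, missing, provided)

-- ===== PRECONDITION & SPEC =====
-- Pre_ excludes association lists with duplicate keys: they represent no Python dict
-- (a Python dict cannot carry duplicate keys), and A's overwrite-on-merge order vs
-- B's first-match lookup are both accidental there.
def Pre_classify_values (required_keys : List String) (overrides_env : Option (List (String × String))) (parsed_env : Option (List (String × String))) (noninteractive : Bool) : Prop :=
  ((overrides_env.getD []).map Prod.fst).Nodup ∧ ((parsed_env.getD []).map Prod.fst).Nodup
instance (required_keys : List String) (overrides_env : Option (List (String × String))) (parsed_env : Option (List (String × String))) (noninteractive : Bool) : Decidable (Pre_classify_values required_keys overrides_env parsed_env noninteractive) := by unfold Pre_classify_values; infer_instance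

def pvWitness_classify_values : List String × (Option (List (String × String))) × (Option (List (String × String))) × Bool :=
  (["PORT", "API_KEY", "HOST"], some [("PORT", "80")], some [("API_KEY", "x"), ("PORT", "9")], false)

def Spec_classify_values (required_keys : List String) (overrides_env : Option (List (String × String))) (parsed_env : Option (List (String × String))) (noninteractive : Bool) (out : (List (String × String)) × (List (String × String)) × List String × List String) : Prop := out = classify_values_alt required_keys overrides_env parsed_env noninteractive
instance (required_keys : List String) (overrides_env : Option (List (String × String))) (parsed_env : Option (List (String × String))) (noninteractive : Bool) (out : (List (String × String)) × (List (String × String)) × List String × List String) : Decidable (Spec_classify_values required_keys overrides_env parsed_env noninteractive out) := by unfold Spec_classify_values; infer_instance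

-- ===== CLAIM (what is proved, stated in full; the proofs are below) =====
def Claim_equal_classify_values : Prop := ∀ (required_keys : List String) (overrides_env : Option (List (String × String))) (parsed_env : Option (List (String × String))) (noninteractive : Bool), Dom_classify_values required_keys overrides_env parsed_env noninteractive → Pre_classify_values required_keys overrides_env parsed_env noninteractive → Spec_classify_values required_keys overrides_env parsed_env noninteractive (classify_values required_keys overrides_env parsed_env noninteractive)

-- ===== LEMMAS AND PROOFS =====

-- first-match lookup on a literal dict, as a find?
theorem get?_mk_eq_find? (l : List (String × String)) (k : String) :
    (PySem.Dict.mk l).get? k = (l.find? (fun kv => kv.1 == k)).map Prod.snd := by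
  induction l with
  | nil => simp [PySem.Dict.get?, List.find?]
  | cons kv t ih =>
    rw [PySem.Dict.get?_mk_cons]
    by_cases h : kv.1 = k
    · rw [List.find?_cons_of_pos (by simpa using h)]
      simp [h]
    · rw [List.find?_cons_of_neg (by simpa using h)]
      simp [h, ih]

-- inserting a nodup-keyed source into a dict: lookup = first match in the source, else old
theorem get?_foldl_insert (l : List (String × String)) (m : PySem.Dict String String)
    (k : String) (hnd : (l.map Prod.fst).Nodup) :
    (l.foldl (fun m kv => m.insert kv.1 kv.2) m).get? k
      = ((l.find? (fun kv => kv.1 == k)).map Prod.snd).or (m.get? k) := by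
  induction l generalizing m with
  | nil => simp
  | cons kv t ih =>
    simp only [List.map_cons, List.nodup_cons] at hnd
    rw [List.foldl_cons, ih _ hnd.2]
    by_cases h : kv.1 = k
    · have hfind : t.find? (fun kv => kv.1 == k) = none := by
        rw [List.find?_eq_none]
        intro x hx hbeq
        exact hnd.1 (by subst h; rw [List.mem_map]; exact ⟨x, hx, by simpa using hbeq⟩)
      rw [List.find?_cons_of_pos (by simpa using h)]
      simp [h, hfind, PySem.Dict.get?_insert_self]
    · rw [List.find?_cons_of_neg (by simpa using h)]
      rw [PySem.Dict.get?_insert]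
      simp [h, Ne.symm h]

-- the merged dict's lookup equals B's override-then-parsed resolution
theorem merged_get?_eq (o p : Option (List (String × String))) (k : String)
    (ho : ((o.getD []).map Prod.fst).Nodup) (hp : ((p.getD []).map Prod.fst).Nodup) :
    ([p.getD [], o.getD []].foldl (fun m source => source.foldl (fun m kv => m.insert kv.1 kv.2) m)
        PySem.Dict.empty).get? k
      = cvb_resolve [o, p] k := by
  have hstep : ([p.getD [], o.getD []].foldl
      (fun m source => source.foldl (fun m kv => m.insert kv.1 kv.2) m)
      PySem.Dict.empty).get? k
      = (match (PySem.Dict.mk (o.getD [])).get? k with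
         | some v => some v
         | none => (PySem.Dict.mk (p.getD [])).get? k) := by
    simp only [List.foldl_cons, List.foldl_nil, get?_foldl_insert (o.getD []) _ k ho,
        get?_foldl_insert (p.getD []) _ k hp, get?_mk_eq_find?, PySem.Dict.get?_empty]
    cases (o.getD []).find? (fun kv => kv.1 == k) <;>
      cases (p.getD []).find? (fun kv => kv.1 == k) <;> simp
  rw [hstep]
  have hid : ∀ x : Option String, (match x with | some v => some v | none => none) = x := by
    intro x; cases x <;> rfl
  cases o <;> cases p <;>
    simp only [Option.getD, cvb_resolve, hid] <;>
    cases hx : (PySem.Dict.mk ([] : List (String × String))).get? k <;>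
      simp [PySem.Dict.get?, hid] at hx ⊢

-- A's single accumulator loop, decomposed into B's four staged passes
theorem stepA_decomp (r : String → Option String) (rk : List String)
    (vp vs : PySem.Dict String String) (miss prov : List String) :
    rk.foldl
      (fun (st : PySem.Dict String String × PySem.Dict String String × List String × List String) k =>
        match r k with
        | some v =>
          if k ∈ NON_SENSITIVE then (st.1.insert k v, st.2.1, st.2.2.1, st.2.2.2 ++ [k])
          else (st.1, st.2.1.insert k v, st.2.2.1, st.2.2.2 ++ [k])
        | none => (st.1, st.2.1, st.2.2.1 ++ [k], st.2.2.2))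
      (vp, vs, miss, prov)
    = ((rk.map (fun k => (k, r k))).foldl (fun d kv =>
          match kv.2 with
          | some v => if kv.1 ∈ NON_SENSITIVE then d.insert kv.1 v else d
          | none => d) vp,
       (rk.map (fun k => (k, r k))).foldl (fun d kv =>
          match kv.2 with
          | some v => if kv.1 ∉ NON_SENSITIVE then d.insert kv.1 v else d
          | none => d) vs,
       miss ++ (((rk.map (fun k => (k, r k))).filter (fun kv => kv.2.isNone)).map Prod.fst),
       prov ++ (((rk.map (fun k => (k, r k))).filter (fun kv => kv.2.isSome)).map Prod.fst)) := by
  induction rk generalizing vp vs miss prov with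
  | nil => simp
  | cons k t ih =>
    simp only [List.foldl_cons, List.map_cons]
    cases hr : r k with
    | none => simp [hr, ih, List.filter_cons]
    | some v =>
      by_cases hk : k ∈ NON_SENSITIVE <;> simp [hr, hk, ih, List.filter_cons]

theorem classify_values_spec : Claim_equal_classify_values := by
  intro rk ov pe ni _ hpre
  obtain ⟨ho, hp⟩ := hpre
  show _ = _
  unfold classify_values classify_values_alt
  have hres : ∀ k : String,
      ([pe.getD [], ov.getD []].foldl
          (fun m source => source.foldl (fun m kv => m.insert kv.1 kv.2) m)
          PySem.Dict.empty).get? k = cvb_resolve [ov, pe] k :=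
    fun k => merged_get?_eq ov pe k ho hp
  simp only [hres]
  rw [stepA_decomp (fun k => cvb_resolve [ov, pe] k) rk]
  simp
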